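/- GENERATED by mk_final_copies.py from the proof of the farm's unit `decode_residue.7c` (farm:decode_residue.7c.1: Lemmas.lean) as the
   re-elaboration sweep compiled it — do not edit. -/
import Asan.CheckWalk
import Vorbis.Spec.Units.decode_residue_7c

open X86 X86.User Asan Vorbis Vorbis.Spec Vorbis.Spec.DecodeResidue

set_option maxRecDepth 4000
set_option maxHeartbeats 4000000

/-!
  decode_residue.7c (0x10f40d – 0x10f4a3; C 2219–2221): the tail of DECODE(q,f,c) expansion #2 (`ch > 2`, pass 0):
  `if (c->sparse) q = c->sorted_values[q]`, `if (q == EOP) goto done`, `part_classdata[0][class_set] = r->classdata[q]`.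

  The same C text as the tail of decode_residue.5 (`r` in r12, the class book `c` in r14, `q` in the 4-byte slot `[rbp−0xb8]`):
  the lemmas of this file are those of the worker of decode_residue.5 over the eight windows of `At17Mid2.same`. The walks
  (`phaseC7c`, `phaseD7c`, `phaseE7c`) are in Proof.lean.
-/

namespace Vorbis.Spec.decode_residue_7c

/-- **The windows segment 7 may have written when this unit is entered, and those this unit writes itself**: the stack below the
steady stack pointer (return addresses of the check calls, the callees' frames), the scratch slots `[rbp−0xb8, rbp−0xa8)` and
`[rbp−0x98, rbp−0x94)`, and the bit reader's windows of `*f`: the list of `At17Mid2.same`. -/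
def wins7c (g : G) : List Span :=
  [⟨(g.e.reg .rsp).toNat - 848, (g.e.reg .rsp).toNat - 248⟩,
   ⟨(g.e.reg .rsp).toNat - 192, (g.e.reg .rsp).toNat - 176⟩,
   ⟨(g.e.reg .rsp).toNat - 160, (g.e.reg .rsp).toNat - 156⟩,
   ⟨(g.e.reg .rdi).toNat + 48, (g.e.reg .rdi).toNat + 56⟩,
   ⟨(g.e.reg .rdi).toNat + 84, (g.e.reg .rdi).toNat + 96⟩,
   ⟨(g.e.reg .rdi).toNat + 136, (g.e.reg .rdi).toNat + 144⟩,
   ⟨(g.e.reg .rdi).toNat + 1484, (g.e.reg .rdi).toNat + 1749⟩,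
   ⟨(g.e.reg .rdi).toNat + 1752, (g.e.reg .rdi).toNat + 1784⟩]

/-- Membership in `wins7c`, as a disjunction of equations. -/
theorem mem_wins7c {g : G} {w : Span} (hw : w ∈ wins7c g) :
    w = ⟨(g.e.reg .rsp).toNat - 848, (g.e.reg .rsp).toNat - 248⟩ ∨
    w = ⟨(g.e.reg .rsp).toNat - 192, (g.e.reg .rsp).toNat - 176⟩ ∨
    w = ⟨(g.e.reg .rsp).toNat - 160, (g.e.reg .rsp).toNat - 156⟩ ∨
    w = ⟨(g.e.reg .rdi).toNat + 48, (g.e.reg .rdi).toNat + 56⟩ ∨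
    w = ⟨(g.e.reg .rdi).toNat + 84, (g.e.reg .rdi).toNat + 96⟩ ∨
    w = ⟨(g.e.reg .rdi).toNat + 136, (g.e.reg .rdi).toNat + 144⟩ ∨
    w = ⟨(g.e.reg .rdi).toNat + 1484, (g.e.reg .rdi).toNat + 1749⟩ ∨
    w = ⟨(g.e.reg .rdi).toNat + 1752, (g.e.reg .rdi).toNat + 1784⟩ := by
  unfold wins7c at hw
  simp only [List.mem_cons, List.mem_nil_iff, or_false] at hw
  exact hw

/-- The class book of the residue, `f->codebooks + r->classbook`, as read at the function's entry. -/
def cbk7c (g : G) : Nat := Residue.cbk g.e.mem g.f g.r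

/-- **COMMON again after a batch of stores inside `wins7c`**: the tree's `Common.carry_decode` (whose ninth window, the rows of
the temp block, is not touched here). -/
theorem carry_common7c {u₀ : State} {g : G} {v s : State} (hent : Entered u₀ g) (hc : Common u₀ g v)
    (rbp : s.reg .rbp = g.e.reg .rsp - 8) (rsp : s.reg .rsp = g.e.reg .rsp - 248)
    (code : CodeOK u₀ s.mem) (inv : abiInv s)
    (fr_f : UInt64.ofNat (s.mem.readLE (g.e.reg .rsp - 184) 8) = g.e.reg .rdi)
    (hs : Mem.SameExcept (wins7c g) v.mem s.mem) (hun : ShadowUntouched v.mem s.mem)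
    (hb : Bits g.Blk g.len s.mem g.f) (hmu : mu s.mem g.f ≤ mu v.mem g.f) : Common u₀ g s :=
  hc.carry_decode hent rsp rbp code inv fr_f (carry_decode_nine hs) hun hb hmu

/-- **Where `*f` is**: in the data space, off the stack region. -/
theorem where_f7c {u₀ : State} {g : G} (hent : Entered u₀ g) :
    0x100000 ≤ g.f ∧ g.f + 1808 ≤ 0xC00000 ∧ (g.f + 1808 ≤ 0x700000 ∨ 0x800000 ≤ g.f) := by
  have hob : g.Blk (objBlock g.f) := hent.vorbis.obj
  have hin := hent.pre.env.ok.inside _ hob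
  have hst := hent.pre.free.offStack _ hob
  simp only [vblock, voff] at hin hst
  omega

/-- **Every window of `wins7c` is a legal decode-time store** (`StoreOK`): the stack windows are off every allocated block, the
five windows of `*f` lie in its decode-time holes. -/
theorem wins_storeOK7c {u₀ : State} {g : G} (hent : Entered u₀ g) (mem : Mem) :
    ∀ s, s ∈ wins7c g → StoreOK g.Blk mem g.f s := by
  intro s hs
  have hroom := hent.room
  have eR : (g.e.reg .rsp).toNat = g.RA := rfl
  have ef : (g.e.reg .rdi).toNat = g.f := rfl
  rcases mem_wins7c hs with rfl | rfl | rfl | rfl | rfl | rfl | rfl | rfl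
  · apply StoreOK.off
    intro B hB
    have := hent.pre.free.offStack B hB
    simp only []
    omega
  · apply StoreOK.off
    intro B hB
    have := hent.pre.free.offStack B hB
    simp only []
    omega
  · apply StoreOK.off
    intro B hB
    have := hent.pre.free.offStack B hB
    simp only []
    omega
  all_goals
    apply StoreOK.hole
    unfold InHole
    simp only []
    omega

/-- A stack slot `[RA − k, RA − k + n)` of the frame that lies outside the three stack windows of `wins7c` reads the same. -/
theorem slot_kept7c {u₀ : State} {g : G} (hent : Entered u₀ g) {m m' : Mem} (hs : Mem.SameExcept (wins7c g) m m')
    (k n : Nat) (hn : n ≤ k) (hk : k ≤ 248) (hoff : n + 192 ≤ k ∨ (k ≤ 176 ∧ n + 160 ≤ k) ∨ k ≤ 156) :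
    m'.readLE (g.e.reg .rsp - UInt64.ofNat k) n = m.readLE (g.e.reg .rsp - UInt64.ofNat k) n := by
  have hroom := hent.room
  have hw := where_f7c hent
  have eR : (g.e.reg .rsp).toNat = g.RA := rfl
  have ef : (g.e.reg .rdi).toNat = g.f := rfl
  have ea : (g.e.reg .rsp - UInt64.ofNat k).toNat = g.RA - k := by
    rw [UInt64.toNat_sub_of_le]
    · rw [UInt64.toNat_ofNat', eR, Nat.mod_eq_of_lt (by omega)]
    · rw [UInt64.le_iff_toNat_le, UInt64.toNat_ofNat', eR, Nat.mod_eq_of_lt (by omega)]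
      omega
  apply hs.readLE _ _ (by rw [ea]; omega)
  intro w hw'
  rw [ea]
  rcases mem_wins7c hw' with rfl | rfl | rfl | rfl | rfl | rfl | rfl | rfl <;> simp only [] <;> omega

/-- **Where the temp block is**: inside the free part of the arena, hence in the data space, off the stack region and off
`*f`. -/
theorem where_tb7c {u₀ : State} {g : G} {v : State} (hent : Entered u₀ g) (hc : Common u₀ g v) :
    g.A.B + g.A.S ≤ g.TB.base ∧ g.TB.base + g.TB.size + 32 ≤ g.A.B + g.A.L ∧
    0x100000 ≤ g.TB.base ∧ g.TB.base + g.TB.size ≤ 0xC00000 ∧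
    (g.TB.base + g.TB.size ≤ 0x700000 ∨ 0x800000 ≤ g.TB.base) ∧
    (g.TB.base + g.TB.size ≤ g.f ∨ g.f + 1808 ≤ g.TB.base) := by
  have hb : ADOBusy g.A' g.others' v.mem g.f g.sz := hc.point.busy
  have hr := hb.ok.tblock_range hc.tblock
  have h2 := hb.ok.AR2
  have h1 := hent.ado.ok.AR1
  have h1x := hent.ado.ok.AR1x
  have hob : g.Blk (objBlock g.f) := hent.vorbis.obj
  have hgap := hent.pre.free.offGap _ hob
  have hle := le_r8 g.TB.size
  simp only [G.A', varena] at hr h2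
  simp only [vblock, voff] at hgap
  omega

/-- The record, the class book's header read the same in two memories that both read them as the entry memory does. -/
theorem reads_between7c {u₀ : State} {g : G} {v s : State} (hc : Common u₀ g v) (hcs : Common u₀ g s) :
    ResidueReads v.mem g.f s.mem g.f g.r := by
  have h1 := hc.reads
  have h2 := hcs.reads
  exact ⟨h2.begin.trans h1.begin.symm, h2.end_.trans h1.end_.symm, h2.part_size.trans h1.part_size.symm,
    h2.classifications.trans h1.classifications.symm, h2.classbook.trans h1.classbook.symm,
    h2.classdata.trans h1.classdata.symm, h2.residue_books.trans h1.residue_books.symm,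
    h2.codebook_count.trans h1.codebook_count.symm, h2.cbk.trans h1.cbk.symm, h2.E.trans h1.E.symm,
    h2.W.trans h1.W.symm⟩

/-- **The `classdata` table of the record is kept by a batch of stores inside `wins7c`** (a CONFIG block: `StoreOK.reads_kept`). -/
theorem classdata_kept7c {u₀ : State} {g : G} {v : State} {m : Mem} (hent : Entered u₀ g) (hc : Common u₀ g v)
    (hs : Mem.SameExcept (wins7c g) v.mem m) :
    (Block.mk (Residue.classdata v.mem g.r) (8 * Residue.E v.mem g.f g.r)).Kept v.mem m := by
  have hv : Real.VorbisOK g.len g.Blk v.mem g.f := hc.point.vorbis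
  have hcfg : ConfigOK g.Blk v.mem g.f := hv.config
  have hk := StoreOK.reads_kept hcfg hent.pre.env.ok hc.sep hs (wins_storeOK7c hent v.mem)
  apply hk
  apply ConfigOK.Reads.residue
  apply ResidueOK.Owns.record g.rn (hc.rn_lt hent)
  rw [hc.config_at]
  exact ResidueAtOK.Owns.classdata

/-- **The whole temp block is kept by a batch of stores inside `wins7c`.** -/
theorem tb_kept7c {u₀ : State} {g : G} {v : State} {m : Mem} (hent : Entered u₀ g) (hc : Common u₀ g v)
    (hs : Mem.SameExcept (wins7c g) v.mem m) : g.TB.Kept v.mem m := by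
  have hroom := hent.room
  have hwf := where_f7c hent
  have hwt := where_tb7c hent hc
  have eR : (g.e.reg .rsp).toNat = g.RA := rfl
  have ef : (g.e.reg .rdi).toNat = g.f := rfl
  apply Block.Kept.of_sameExcept hs
  · intro w hw
    rcases mem_wins7c hw with rfl | rfl | rfl | rfl | rfl | rfl | rfl | rfl <;> simp only [] <;> omega
  · omega

/-- **FILL of a row is kept by a batch of stores inside `wins7c`.** -/
theorem fill_kept7c {u₀ : State} {g : G} {v s : State} (hent : Entered u₀ g) (hc : Common u₀ g v) (hcs : Common u₀ g s)
    (hs : Mem.SameExcept (wins7c g) v.mem s.mem) {j m : Nat} (hj : j < g.C) (hm : m ≤ g.PRD)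
    (h : Fill v.mem g.f g.r g.TB g.C g.PRD j m) : Fill s.mem g.f g.r g.TB g.C g.PRD j m :=
  h.frame hj hm hc.tb.size (tb_kept7c hent hc hs) (reads_between7c hc hcs) (classdata_kept7c hent hc hs)

/-- An `int` of the own frame above the windows (`c_inter`, `p_inter`) reads the same after a batch of stores inside `wins7c`. -/
theorem i32_kept7c {u₀ : State} {g : G} (hent : Entered u₀ g) {m m' : Mem} (hs : Mem.SameExcept (wins7c g) m m')
    (a : Nat) (h1 : g.RA - 156 ≤ a) (h2 : a + 4 ≤ g.RA) : m'.i32 a = m.i32 a := by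
  have hroom := hent.room
  have hw := where_f7c hent
  have eR : (g.e.reg .rsp).toNat = g.RA := rfl
  have ef : (g.e.reg .rdi).toNat = g.f := rfl
  have ea : (addr a).toNat = a := toNat_addr a (by omega)
  have e : m'.readLE (addr a) 4 = m.readLE (addr a) 4 := by
    apply hs.readLE _ _ (by rw [ea]; omega)
    intro w hw'
    rw [ea]
    rcases mem_wins7c hw' with rfl | rfl | rfl | rfl | rfl | rfl | rfl | rfl <;> simp only [] <;> omega
  show sint32 (m'.readLE (addr a) 4) = sint32 (m.readLE (addr a) 4)
  rw [e]

/-- **The loop part of the entry assertion (`DecodeA`) again after a batch of stores inside `wins7c`**: the three slots of path A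
and `class_set` are outside the windows, FILL is kept (`fill_kept7c`), the two ints of the protected frame are above the windows. -/
theorem carry_decodeA7c {u₀ : State} {g : G} {v s : State} {cs pcount : Nat} (hent : Entered u₀ g) (hc : Common u₀ g v)
    (hcs : Common u₀ g s) (hch3 : 3 ≤ g.ch) (hs : Mem.SameExcept (wins7c g) v.mem s.mem) (hl : DecodeA g cs pcount v)
    (r15 : s.reg .r15 = UInt64.ofNat pcount) : DecodeA g cs pcount s := by
  have hroom := hent.room
  have hC : 0 < g.C := by
    have := hent.args.ch_le
    have e : g.C = nchan g.e.mem g.f := rfl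
    omega
  refine ⟨⟨hl.path.rtype2, hl.path.ch_ge, hl.path.pass_le, ?_, ?_, ?_⟩, r15, ?_, ?_, hl.lt, ?_⟩
  · have e : s.mem.readLE (g.e.reg .rsp - 168) 4 = v.mem.readLE (g.e.reg .rsp - 168) 4 :=
      slot_kept7c hent hs 168 4 (by omega) (by omega) (by omega)
    rw [e]
    exact hl.path.sl_pass
  · have e : s.mem.readLE (g.e.reg .rsp - 228) 4 = v.mem.readLE (g.e.reg .rsp - 228) 4 :=
      slot_kept7c hent hs 228 4 (by omega) (by omega) (by omega)
    rw [e]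
    exact hl.path.sl_tap
  · have e : s.mem.readLE (g.e.reg .rsp - 208) 4 = v.mem.readLE (g.e.reg .rsp - 208) 4 :=
      slot_kept7c hent hs 208 4 (by omega) (by omega) (by omega)
    rw [e]
    exact hl.path.sl_n
  · have e : s.mem.readLE (g.e.reg .rsp - 224) 4 = v.mem.readLE (g.e.reg .rsp - 224) 4 :=
      slot_kept7c hent hs 224 4 (by omega) (by omega) (by omega)
    rw [e]
    exact hl.sl_cs
  · apply hl.wa.frame (fun j h => h) ?_ (hc.w_pos hent)
    intro j m hj hF hm
    have hj0 : j = 0 := hj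
    exact fill_kept7c hent hc hcs hs (by omega) hm hF
  · apply hl.inter.frame
    · exact i32_kept7c hent hs g.ci (by unfold G.ci; omega) (by unfold G.ci; omega)
    · exact i32_kept7c hent hs g.pi (by unfold G.pi; omega) (by unfold G.pi; omega)

/-- **Where the residue record is**: in the data space, off the stack region, off `*f`. -/
theorem where_r7c {u₀ : State} {g : G} {v : State} (hent : Entered u₀ g) (hc : Common u₀ g v) :
    0x100000 ≤ g.r ∧ g.r + 32 ≤ 0xC00000 ∧ (g.r + 32 ≤ 0x700000 ∨ 0x800000 ≤ g.r) ∧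
    (g.r + 32 ≤ g.f ∨ g.f + 1808 ≤ g.r) := by
  have hv : Real.VorbisOK g.len g.Blk v.mem g.f := hc.point.vorbis
  have hcfg : ConfigOK g.Blk v.mem g.f := hv.config
  have hR : ResidueOK g.Blk v.mem g.f := hv.residue
  have hB := hR.R2
  have hin := hent.pre.env.ok.inside _ hB
  have hst := hent.pre.free.offStack _ hB
  have hd := hc.sep.obj _ (ConfigOK.Reads.residue ResidueOK.Owns.config)
  have hlt := hc.rn_lt hent
  have h1 := hR.R1
  have e := hc.config_at
  unfold stb_vorbis.residue_config_at at e
  simp only [vblock, voff] at hin hst hd e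
  omega

/-- **A field of the residue record** is a check site (R2). -/
theorem site_r7c {u₀ : State} {g : G} {v : State} (hent : Entered u₀ g) (hc : Common u₀ g v) (off n : Nat)
    (hoff : off + n ≤ 32) (hn : 1 ≤ n) : Site g.Live' (g.r + off) n := by
  have hv : Real.VorbisOK g.len g.Blk v.mem g.f := hc.point.vorbis
  have hR : ResidueOK g.Blk v.mem g.f := hv.residue
  have hL : BlkLive g.Blk g.Live' := hc.point.env.live
  apply hR.site_record hL (hc.rn_lt hent) off n (by simp only [voff]; omega) hn
  rw [hc.config_at]

/-- **The class book**: its address in the present memory, `CodebookOK`, the struct inside the codebooks block, apart from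
`*f`. -/
theorem book_facts7c {u₀ : State} {g : G} {v : State} (hent : Entered u₀ g) (hc : Common u₀ g v) :
    stb_vorbis.codebooks v.mem g.f + 2120 * Residue.classbook v.mem g.r = cbk7c g ∧
    CodebookOK g.Blk v.mem (cbk7c g) ∧ BookApart v.mem g.f (cbk7c g) ∧
    (∃ B, g.Blk B ∧ B.contains (cbk7c g) Off.sizeof.Codebook) ∧ Residue.classbook v.mem g.r < 256 := by
  have hv : Real.VorbisOK g.len g.Blk v.mem g.f := hc.point.vorbis
  have hcfg : ConfigOK g.Blk v.mem g.f := hv.config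
  have h7 := (hc.resAt hent).R7
  have e : Residue.cbk v.mem g.f g.r = cbk7c g := hc.reads.cbk
  have e' : stb_vorbis.codebooks_at v.mem g.f (Residue.classbook v.mem g.r) = cbk7c g := e
  have hlt : Residue.classbook v.mem g.r < 256 := by
    simp only [vacc, voff]
    exact Mem.u8_lt _ _
  refine ⟨?_, ?_, ?_, ?_, hlt⟩
  · rw [← e']
    unfold stb_vorbis.codebooks_at
    simp only [voff]
  · rw [← e']
    exact hcfg.books _ h7
  · rw [← e']
    exact hc.sep.bookApart hcfg _ h7
  · rw [← e']
    refine ⟨_, hcfg.cb0.F2, ?_⟩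
    have hcnt := hcfg.cb0.F1
    have hi' : Residue.classbook v.mem g.r < (stb_vorbis.codebook_count v.mem g.f).toNat := by omega
    constructor
    · show stb_vorbis.codebooks v.mem g.f ≤ stb_vorbis.codebooks_at v.mem g.f _
      unfold stb_vorbis.codebooks_at
      omega
    · show stb_vorbis.codebooks_at v.mem g.f _ + Off.sizeof.Codebook ≤
        stb_vorbis.codebooks v.mem g.f + Off.sizeof.Codebook * (stb_vorbis.codebook_count v.mem g.f).toNat
      unfold stb_vorbis.codebooks_at
      simp only [voff]
      omega

/-- **Where the class book's struct is**: in the data space, off the stack region, off `*f`. -/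
theorem where_cb7c {u₀ : State} {g : G} {v : State} (hent : Entered u₀ g) (hc : Common u₀ g v) :
    0x100000 ≤ cbk7c g ∧ cbk7c g + 2120 ≤ 0xC00000 ∧ (cbk7c g + 2120 ≤ 0x700000 ∨ 0x800000 ≤ cbk7c g) ∧
    (cbk7c g + 2120 ≤ g.f ∨ g.f + 1808 ≤ cbk7c g) := by
  obtain ⟨_, _, hapart, ⟨B, hB, hin⟩, _⟩ := book_facts7c hent hc
  have hins := hent.pre.env.ok.inside _ hB
  have hst := hent.pre.free.offStack _ hB
  have hd := hapart.book
  simp only [vblock, voff] at hin hd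
  omega

/-- **The fields of the class book's struct read the same after a batch of stores inside `wins7c`.** -/
theorem book_fields_kept7c {u₀ : State} {g : G} {v : State} {m : Mem} (hent : Entered u₀ g) (hc : Common u₀ g v)
    (hs : Mem.SameExcept (wins7c g) v.mem m) : Codebook.SameFields v.mem m (cbk7c g) := by
  obtain ⟨_, hcb, hapart, ⟨B, hB, hin⟩, _⟩ := book_facts7c hent hc
  have hok := hent.pre.env.ok
  have hroom := hent.room
  have hwc := where_cb7c hent hc
  have eR : (g.e.reg .rsp).toNat = g.RA := rfl
  have ef : (g.e.reg .rdi).toNat = g.f := rfl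
  have hd1 : ∀ w, w ∈ wins7c g →
      (Codebook.block (cbk7c g)).base + (Codebook.block (cbk7c g)).size ≤ w.lo ∨ w.hi ≤ (Codebook.block (cbk7c g)).base := by
    intro w hw
    simp only [voff]
    rcases mem_wins7c hw with rfl | rfl | rfl | rfl | rfl | rfl | rfl | rfl <;> simp only [] <;> omega
  exact Codebook.SameFields.of_kept (Block.Kept.of_sameExcept hs hd1 (Codebook.block_no_wrap hok hB hin))

/-- **A field of the class book's struct** is a check site. -/
theorem site_cbf7c {u₀ : State} {g : G} {v : State} (hent : Entered u₀ g) (hc : Common u₀ g v) (off n : Nat)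
    (hoff : off + n ≤ 2120) (hn : 1 ≤ n) : Site g.Live' (cbk7c g + off) n := by
  obtain ⟨_, _, _, ⟨B, hB, hin⟩, _⟩ := book_facts7c hent hc
  have hL : BlkLive g.Blk g.Live' := hc.point.env.live
  exact Codebook.site_field hL hB hin off n (by simp only [voff]; omega) hn rfl

/-- `shl r, 2` is `* 4`. -/
theorem shl2_mul4_7c (x : Word) : x <<< 2 = x * 4 := by
  bv_decide

/-- **The translation load `c->sorted_values[q]` of DECODE for a sparse class book** (K4 with its sentinel, K4c): the word
loaded — for `q = −1` the one BEFORE the pointer — is a check site inside the `sorted_values` block, which is off the stack; its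
value is a DECODE result. -/
theorem sv_site7c {u₀ : State} {g : G} {v : State} (hent : Entered u₀ g) (hc : Common u₀ g v)
    (hsp : Codebook.sparse v.mem (cbk7c g) ≠ 0) {q : Int} (hq : DecodeRawResult v.mem (cbk7c g) q) :
    Site g.Live' (Codebook.sorted_values v.mem (cbk7c g) - 4 + 4 * (q + 1).toNat) 4 ∧
    4 ≤ Codebook.sorted_values v.mem (cbk7c g) ∧
    0x100000 ≤ Codebook.sorted_values v.mem (cbk7c g) - 4 + 4 * (q + 1).toNat ∧
    Codebook.sorted_values v.mem (cbk7c g) - 4 + 4 * (q + 1).toNat + 4 ≤ 0xC00000 ∧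
    (Codebook.sorted_values v.mem (cbk7c g) - 4 + 4 * (q + 1).toNat + 4 ≤ 0x700000 ∨
      0x800000 ≤ Codebook.sorted_values v.mem (cbk7c g) - 4 + 4 * (q + 1).toNat) ∧
    -1 ≤ q ∧ q < 2 ^ 31 ∧
    DecodeResult v.mem (cbk7c g) (Codebook.sortedValue v.mem (cbk7c g) q) := by
  obtain ⟨_, hcb, _, _, _⟩ := book_facts7c hent hc
  have hL : BlkLive g.Blk g.Live' := hc.point.env.live
  have hok := hent.pre.env.ok
  have hse := hcb.se_pos_of_sparse hsp
  have hge := hcb.sorted_values_ge hok hse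
  have hsite := hcb.site_sortedValue hL hsp hq rfl
  have hin := hsite.inside hc.point.env.covers
  have hblk := hcb.K4.sv hse
  have hst := hent.pre.free.offStack _ hblk
  have hNlt := Codebook.N_lt hcb.K1 hcb.K2
  have hN := Codebook.N_sparse (mem := v.mem) (c := cbk7c g) hsp
  have hres := hcb.decode_sparse hok hsp hq
  simp only [] at hst
  refine ⟨hsite, by omega, hin.1, hin.2, ?_, ?_, ?_, hres⟩
  · cases hq with
    | inl h1 =>
      rw [h1]
      have e0 : ((-1 : Int) + 1).toNat = 0 := rfl
      rw [e0]
      omega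
    | inr h2 => omega
  · cases hq with
    | inl h1 => omega
    | inr h2 => omega
  · cases hq with
    | inl h1 => omega
    | inr h2 => omega

/-- A DECODE result of the class book stays one after a batch of stores inside `wins7c` (`entries` reads the same). -/
theorem result_kept7c {u₀ : State} {g : G} {v : State} {m : Mem} (hent : Entered u₀ g) (hc : Common u₀ g v)
    (hs : Mem.SameExcept (wins7c g) v.mem m) {q : Int} (h : DecodeResult v.mem (cbk7c g) q) :
    DecodeResult m (cbk7c g) q := by
  have e := (book_fields_kept7c hent hc hs).entries
  unfold DecodeResult at h ⊢
  rw [e]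
  exact h

/-- `shl r, 3` is `* 8`. -/
theorem shl3_mul8_7c (x : Word) : x <<< 3 = x * 8 := by
  bv_decide

/-- `movsxd rax, [rbp-0xd8] ; shl rax, 3 ; add rax, [r14]`: the address of `part_classdata[0][class_set]`. -/
theorem slot_addr7c (row0 cs : Nat) (h : cs < 2 ^ 31) :
    Word.ofBV (BitVec.signExtend 64 (BitVec.ofNat 32 cs)) <<< 3 + UInt64.ofNat row0 = addr (row0 + 8 * cs) := by
  rw [ofBV_signExtend64, toInt_ofNat32 cs (by omega)]
  have e : sint32 cs = (cs : Int) := by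
    unfold sint32
    rw [if_pos (by omega)]
  rw [e, shl3_mul8_7c, word_nonneg _ (Int.natCast_nonneg _), Int.toNat_natCast]
  have e8 : (8 : Word) = addr 8 := rfl
  rw [e8, addr_mul_addr]
  show addr (cs * 8) + addr row0 = _
  rw [addr_add_addr]
  congr 1
  omega

/-- **`r->classdata[q]` for a DECODE result `q ≠ −1` of the class book** (R8a): the pointer table entry is a check site inside
the `classdata` block, which is off the stack; the pointer loaded is a row pointer. -/
theorem cd_site7c {u₀ : State} {g : G} {v : State} (hent : Entered u₀ g) (hc : Common u₀ g v) {q : Int}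
    (hq : DecodeResult v.mem (cbk7c g) q) (hne : q ≠ -1) :
    0 ≤ q ∧ q < 2 ^ 31 ∧
    Site g.Live' (Residue.classdata v.mem g.r + 8 * q.toNat) 8 ∧
    0x100000 ≤ Residue.classdata v.mem g.r + 8 * q.toNat ∧
    Residue.classdata v.mem g.r + 8 * q.toNat + 8 ≤ 0xC00000 ∧
    (Residue.classdata v.mem g.r + 8 * q.toNat + 8 ≤ 0x700000 ∨ 0x800000 ≤ Residue.classdata v.mem g.r + 8 * q.toNat) ∧
    RowPtr v.mem g.f g.r (v.mem.ptr (Residue.classdata v.mem g.r + 8 * q.toNat)) := by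
  obtain ⟨_, hcb, _, _, _⟩ := book_facts7c hent hc
  have hL : BlkLive g.Blk g.Live' := hc.point.env.live
  have hres := hc.resAt hent
  have ecb : Residue.cbk v.mem g.f g.r = cbk7c g := hc.reads.cbk
  have hE : Residue.E v.mem g.f g.r = (Codebook.entries v.mem (cbk7c g)).toNat := by
    unfold Residue.E
    rw [ecb]
  have hK1 := hcb.K1
  have hlt : Codebook.entries v.mem (cbk7c g) < 2 ^ 31 := by
    have h2 := hK1.ent_lt
    omega
  have hq' : 0 ≤ q ∧ q < Codebook.entries v.mem (cbk7c g) := by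
    cases hq with
    | inl h => exact absurd h hne
    | inr h => exact h
  have hqE : q.toNat < Residue.E v.mem g.f g.r := by
    rw [hE]
    omega
  have hsite := hres.site_classdata hL hqE rfl
  have hin := hsite.inside hc.point.env.covers
  have hst := hent.pre.free.offStack _ hres.R8a
  simp only [] at hst
  refine ⟨hq'.1, by omega, hsite, hin.1, hin.2, by omega, ?_⟩
  exact RowPtr.of_row v.mem g.f g.r hqE

/-- A read of the own frame `[RA − k, RA − k + n)`, `k ≤ 248`, is not changed by stores off the stack region. -/
theorem frame_kept7c {u₀ : State} {g : G} (hent : Entered u₀ g) {m m' : Mem} {lo hi : Nat}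
    (hs : Mem.SameExcept [⟨lo, hi⟩] m m') (hoff : hi ≤ 0x700000 ∨ 0x800000 ≤ lo)
    (k n : Nat) (hn : n ≤ k) (hk : k ≤ 248) :
    m'.readLE (g.e.reg .rsp - UInt64.ofNat k) n = m.readLE (g.e.reg .rsp - UInt64.ofNat k) n := by
  have hroom := hent.room
  have eR : (g.e.reg .rsp).toNat = g.RA := rfl
  have ea : (g.e.reg .rsp - UInt64.ofNat k).toNat = g.RA - k := by
    rw [UInt64.toNat_sub_of_le]
    · rw [UInt64.toNat_ofNat', eR, Nat.mod_eq_of_lt (by omega)]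
    · rw [UInt64.le_iff_toNat_le, UInt64.toNat_ofNat', eR, Nat.mod_eq_of_lt (by omega)]
      omega
  apply hs.readLE _ _ (by rw [ea]; omega)
  intro w hw'
  rw [ea]
  have e : w = ⟨lo, hi⟩ := List.mem_singleton.mp hw'
  subst e
  simp only []
  omega

/-- **COMMON after the store of pass 0**, `part_classdata[0][class_set] = r->classdata[q]`: one 8-byte store into a slot of the
temp block — off the stack, off `*f`, off every allocated block, inside the free part of the arena (a window of the footprint). -/
theorem final_common7c {u₀ : State} {g : G} {s1 s2 : State} {cs : Nat} (hent : Entered u₀ g) (hc : Common u₀ g s1)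
    (hch3 : 3 ≤ g.ch) (hcs : cs < g.PRD)
    (rbp : s2.reg .rbp = g.e.reg .rsp - 8) (rsp : s2.reg .rsp = g.e.reg .rsp - 248)
    (code : CodeOK u₀ s2.mem) (inv : abiInv s2) (row : Nat)
    (hmem : s2.mem = s1.mem.writeLE (addr (slot g.TB g.C g.PRD 0 cs)) 8 row)
    (hun : ShadowUntouched s1.mem s2.mem) :
    Common u₀ g s2 ∧
      Mem.SameExcept [⟨slot g.TB g.C g.PRD 0 cs, slot g.TB g.C g.PRD 0 cs + 8⟩] s1.mem s2.mem := by
  have hroom := hent.room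
  have hwf := where_f7c hent
  have hwt := where_tb7c hent hc
  have eR : (g.e.reg .rsp).toNat = g.RA := rfl
  have ef : (g.e.reg .rdi).toNat = g.f := rfl
  have hC : 0 < g.C := by
    have := hent.args.ch_le
    have e : g.C = nchan g.e.mem g.f := rfl
    omega
  have hin := slot_inside g.TB hC hcs hc.tb.size
  have ea : (addr (slot g.TB g.C g.PRD 0 cs)).toNat = slot g.TB g.C g.PRD 0 cs := toNat_addr _ (by omega)
  have hs : Mem.SameExcept [⟨slot g.TB g.C g.PRD 0 cs, slot g.TB g.C g.PRD 0 cs + 8⟩] s1.mem s2.mem := by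
    rw [hmem]
    apply Mem.SameExcept.step_writeLE' _ _ _ (Mem.SameExcept.refl _ _) (by rw [ea]; omega)
    rw [ea]
    exact ⟨_, List.Mem.head _, Nat.le_refl _, Nat.le_refl _⟩
  have hoffst : slot g.TB g.C g.PRD 0 cs + 8 ≤ 0x700000 ∨ 0x800000 ≤ slot g.TB g.C g.PRD 0 cs := by omega
  have hbusy : ADOBusy g.A' g.others' s1.mem g.f g.sz := hc.point.busy
  have hbits : Bits g.Blk g.len s1.mem g.f := (show Real.VorbisOK g.len g.Blk s1.mem g.f from hc.point.vorbis).bits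
  have hobj : (objBlock g.f).Same s1.mem s2.mem := by
    apply Block.Same.of_sameExcept hs
    intro w hw
    have e : w = ⟨slot g.TB g.C g.PRD 0 cs, slot g.TB g.C g.PRD 0 cs + 8⟩ := List.mem_singleton.mp hw
    subst e
    simp only [vblock, voff]
    omega
  refine ⟨?_, hs⟩
  apply Common.of_frame hent rbp rsp code inv
  · have e : s2.mem.readLE (g.e.reg .rsp - 8) 8 = s1.mem.readLE (g.e.reg .rsp - 8) 8 :=
      frame_kept7c hent hs hoffst 8 8 (by omega) (by omega)
    rw [e]
    exact hc.s_rbp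
  · have e : s2.mem.readLE (g.e.reg .rsp - 16) 8 = s1.mem.readLE (g.e.reg .rsp - 16) 8 :=
      frame_kept7c hent hs hoffst 16 8 (by omega) (by omega)
    rw [e]
    exact hc.s_r15
  · have e : s2.mem.readLE (g.e.reg .rsp - 24) 8 = s1.mem.readLE (g.e.reg .rsp - 24) 8 :=
      frame_kept7c hent hs hoffst 24 8 (by omega) (by omega)
    rw [e]
    exact hc.s_r14
  · have e : s2.mem.readLE (g.e.reg .rsp - 32) 8 = s1.mem.readLE (g.e.reg .rsp - 32) 8 :=
      frame_kept7c hent hs hoffst 32 8 (by omega) (by omega)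
    rw [e]
    exact hc.s_r13
  · have e : s2.mem.readLE (g.e.reg .rsp - 40) 8 = s1.mem.readLE (g.e.reg .rsp - 40) 8 :=
      frame_kept7c hent hs hoffst 40 8 (by omega) (by omega)
    rw [e]
    exact hc.s_r12
  · have e : s2.mem.readLE (g.e.reg .rsp - 48) 8 = s1.mem.readLE (g.e.reg .rsp - 48) 8 :=
      frame_kept7c hent hs hoffst 48 8 (by omega) (by omega)
    rw [e]
    exact hc.s_rbx
  · have e : s2.mem.readLE (g.e.reg .rsp - 184) 8 = s1.mem.readLE (g.e.reg .rsp - 184) 8 :=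
      frame_kept7c hent hs hoffst 184 8 (by omega) (by omega)
    rw [e]
    exact hc.fr_f
  · have e : s2.mem.readLE (g.e.reg .rsp - 216) 8 = s1.mem.readLE (g.e.reg .rsp - 216) 8 :=
      frame_kept7c hent hs hoffst 216 8 (by omega) (by omega)
    rw [e]
    exact hc.fr_rb
  · have e : s2.mem.readLE (g.e.reg .rsp - 156) 4 = s1.mem.readLE (g.e.reg .rsp - 156) 4 :=
      frame_kept7c hent hs hoffst 156 4 (by omega) (by omega)
    rw [e]
    exact hc.fr_ch
  · have e : s2.mem.readLE (g.e.reg .rsp - 196) 4 = s1.mem.readLE (g.e.reg .rsp - 196) 4 :=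
      frame_kept7c hent hs hoffst 196 4 (by omega) (by omega)
    rw [e]
    exact hc.fr_prd
  · have e : s2.mem.readLE (g.e.reg .rsp - 200) 4 = s1.mem.readLE (g.e.reg .rsp - 200) 4 :=
      frame_kept7c hent hs hoffst 200 4 (by omega) (by omega)
    rw [e]
    exact hc.fr_w
  · have e : s2.mem.readLE (g.e.reg .rsp - 232) 4 = s1.mem.readLE (g.e.reg .rsp - 232) 4 :=
      frame_kept7c hent hs hoffst 232 4 (by omega) (by omega)
    rw [e]
    exact hc.fr_rtype
  · have e : s2.mem.readLE (g.e.reg .rsp - 176) 8 = s1.mem.readLE (g.e.reg .rsp - 176) 8 :=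
      frame_kept7c hent hs hoffst 176 8 (by omega) (by omega)
    rw [e]
    exact hc.fr_pcd
  · have e : s2.mem.readLE (g.e.reg .rsp - 240) 8 = s1.mem.readLE (g.e.reg .rsp - 240) 8 :=
      frame_kept7c hent hs hoffst 240 8 (by omega) (by omega)
    rw [e]
    exact hc.fr_si
  · -- the footprint: the slot lies in the free part of the arena
    apply Mem.SameExcept.step_same' hc.same hs
    intro w hw
    have e : w = ⟨slot g.TB g.C g.PRD 0 cs, slot g.TB g.C g.PRD 0 cs + 8⟩ := List.mem_singleton.mp hw
    subst e
    right
    unfold Spec.footprint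
    have hwr : g.spec.writes g.e = DecodeResidue.writes g.A g.e := rfl
    rw [hwr]
    unfold DecodeResidue.writes
    refine ⟨_, List.Mem.tail _ (List.mem_append_left _ (List.Mem.tail _ (List.Mem.tail _ (List.Mem.tail _
      (List.Mem.tail _ (List.Mem.tail _ (List.Mem.head _))))))), ?_, ?_⟩
    · simp only []
      omega
    · simp only []
      omega
  · exact hc.shadow.untouched hun
  · exact hbits.frame_fields (Bits.SameFields.of_same hobj)
  · apply hbusy.transfer
    apply ObjEq.of_sameExcept hs
    · intro w hw
      simp only [ADO.wins, List.mem_cons, List.mem_nil_iff, or_false] at hw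
      rcases hw with rfl | rfl <;> simp only [] <;> omega
    · intro w hw sp hsp
      have e : sp = ⟨slot g.TB g.C g.PRD 0 cs, slot g.TB g.C g.PRD 0 cs + 8⟩ := List.mem_singleton.mp hsp
      subst e
      simp only [ADO.wins, List.mem_cons, List.mem_nil_iff, or_false] at hw
      rcases hw with rfl | rfl <;> simp only [] <;> omega
  · rw [hmem]
    exact hc.tb.store_slot hC hcs row (by omega)
  · have e := mu_frame_obj (by omega) hobj
    have := hc.mu_le
    omega

/-- **The loop part of the exit assertion (`InnerA` with `i = 0`) after the store of pass 0**: the slot `class_set` of row 0 now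
holds a row pointer (`Fill.store`), the slots below are untouched, the frame's slots and the two ints are off the temp block. -/
theorem final_inner7c {u₀ : State} {g : G} {s1 s2 : State} {cs pcount : Nat} (hent : Entered u₀ g) (hc : Common u₀ g s1)
    (hc2 : Common u₀ g s2) (hl : DecodeA g cs pcount s1) (r15 : s2.reg .r15 = UInt64.ofNat pcount) (row : Nat)
    (hrow : RowPtr s1.mem g.f g.r row) (hrow_lt : row < 2 ^ 64)
    (hmem : s2.mem = s1.mem.writeLE (addr (slot g.TB g.C g.PRD 0 cs)) 8 row)
    (hs : Mem.SameExcept [⟨slot g.TB g.C g.PRD 0 cs, slot g.TB g.C g.PRD 0 cs + 8⟩] s1.mem s2.mem) :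
    InnerA g 0 cs pcount s2 := by
  have hroom := hent.room
  have hwt := where_tb7c hent hc
  have eR : (g.e.reg .rsp).toNat = g.RA := rfl
  have hcs : cs < g.PRD := hl.wa.slot_lt (hc.w_pos hent) hl.lt
  have hC : 0 < g.C := by
    have := hent.args.ch_le
    have e : g.C = nchan g.e.mem g.f := rfl
    have := hl.path.ch_ge
    omega
  have hin := slot_inside g.TB hC hcs hc.tb.size
  have hoffst : slot g.TB g.C g.PRD 0 cs + 8 ≤ 0x700000 ∨ 0x800000 ≤ slot g.TB g.C g.PRD 0 cs := by omega
  have hi32 : ∀ a : Nat, g.RA - 176 ≤ a → a + 4 ≤ g.RA → s2.mem.i32 a = s1.mem.i32 a := by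
    intro a h1 h2
    have ea : (addr a).toNat = a := toNat_addr a (by omega)
    have e : s2.mem.readLE (addr a) 4 = s1.mem.readLE (addr a) 4 := by
      apply hs.readLE _ _ (by rw [ea]; omega)
      intro w hw
      have e : w = ⟨slot g.TB g.C g.PRD 0 cs, slot g.TB g.C g.PRD 0 cs + 8⟩ := List.mem_singleton.mp hw
      subst e
      rw [ea]
      simp only []
      omega
    show sint32 (s2.mem.readLE (addr a) 4) = sint32 (s1.mem.readLE (addr a) 4)
    rw [e]
  have hv1 : Real.VorbisOK g.len g.Blk s1.mem g.f := hc.point.vorbis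
  have hcd : (Block.mk (Residue.classdata s1.mem g.r) (8 * Residue.E s1.mem g.f g.r)).Kept s1.mem s2.mem := by
    have hB := (hc.resAt hent).R8a
    apply Block.Kept.of_sameExcept hs _ (hent.pre.env.ok.no_wrap hB)
    intro w hw
    have e : w = ⟨slot g.TB g.C g.PRD 0 cs, slot g.TB g.C g.PRD 0 cs + 8⟩ := List.mem_singleton.mp hw
    subst e
    have hgap := hent.pre.free.offGap _ hB
    simp only [] at hgap ⊢
    omega
  have hrd := reads_between7c hc hc2
  refine ⟨⟨hl.path.rtype2, hl.path.ch_ge, hl.path.pass_le, ?_, ?_, ?_⟩, r15, ?_, ?_, ?_⟩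
  · have e : s2.mem.readLE (g.e.reg .rsp - 168) 4 = s1.mem.readLE (g.e.reg .rsp - 168) 4 :=
      frame_kept7c hent hs hoffst 168 4 (by omega) (by omega)
    rw [e]
    exact hl.path.sl_pass
  · have e : s2.mem.readLE (g.e.reg .rsp - 228) 4 = s1.mem.readLE (g.e.reg .rsp - 228) 4 :=
      frame_kept7c hent hs hoffst 228 4 (by omega) (by omega)
    rw [e]
    exact hl.path.sl_tap
  · have e : s2.mem.readLE (g.e.reg .rsp - 208) 4 = s1.mem.readLE (g.e.reg .rsp - 208) 4 :=
      frame_kept7c hent hs hoffst 208 4 (by omega) (by omega)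
    rw [e]
    exact hl.path.sl_n
  · have e : s2.mem.readLE (g.e.reg .rsp - 224) 4 = s1.mem.readLE (g.e.reg .rsp - 224) 4 :=
      frame_kept7c hent hs hoffst 224 4 (by omega) (by omega)
    rw [e]
    exact hl.sl_cs
  · apply hl.wa.enter0 hl.lt
    intro j hj
    have hj0 : j = 0 := hj
    subst hj0
    rw [hmem]
    apply (hl.wa.fill0 rfl 0 rfl).store hC hcs hc.tb.size (by omega) row hrow_lt
    · intro w hw
      rw [← hmem]
      exact hw.frame hrd hcd
    · exact hrow
  · apply hl.inter.frame
    · exact hi32 g.ci (by unfold G.ci; omega) (by unfold G.ci; omega)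
    · exact hi32 g.pi (by unfold G.pi; omega) (by unfold G.pi; omega)



/-- `movsxd rbx, DWORD [rbp−0xb8] ; shl rbx, 2 ; add rbx, [c + 0x838]`: the address of `c->sorted_values[q]` for a 32-bit `q ≥ −1`
whose unsigned pattern `qn` was loaded from the scratch slot, as the number address of `Codebook.sortedValue`. -/
theorem sv_addr7c (sv qn : Nat) (q : Int) (hqn : (q % 2 ^ 32).toNat = qn) (h1 : -1 ≤ q) (h2 : q < 2 ^ 31) (hsv : 4 ≤ sv) :
    Word.ofBV (BitVec.signExtend 64 (BitVec.ofNat 32 qn)) <<< 2 + UInt64.ofNat sv =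
      addr (sv - 4 + 4 * (q + 1).toNat) := by
  rw [ofBV_signExtend64, toInt_ofNat32 qn (by omega)]
  have e : sint32 qn = q := by
    unfold sint32
    split <;> omega
  rw [e, shl2_mul4_7c, UInt64.add_comm]
  exact addr_add_word_mul4 sv q h1 hsv

/-- `movsxd rbx, ebx ; shl rbx, 3 ; add rbx, [r + 0x10]`: the address of `r->classdata[q]`, `q ≥ 0`, for the unsigned pattern
`qn` of `q` loaded from the scratch slot. -/
theorem cd_addr7c (cd qn : Nat) (q : Int) (hqn : (q % 2 ^ 32).toNat = qn) (h1 : 0 ≤ q) (h2 : q < 2 ^ 31) :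
    Word.ofBV (BitVec.signExtend 64 (BitVec.ofNat 32 qn)) <<< 3 + UInt64.ofNat cd = addr (cd + 8 * q.toNat) := by
  have e : qn = q.toNat := by omega
  rw [e]
  exact slot_addr7c cd q.toNat (by omega)

/-- The unsigned 32-bit pattern of the signed reading of a 32-bit number is the number. -/
theorem pattern_sint32_7c (x : Nat) (h : x < 2 ^ 32) : (sint32 x % 2 ^ 32).toNat = x := by
  unfold sint32
  split <;> omega

/-- The join after the `sorted_values` translation (`mov ebx, [rbp−0xb8]` at 0x10f447: the scratch slot holds `q`). -/
abbrev joinD7c : Word := Vorbis.L.decode_residue.entry + 0x847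

/-- The last cut inside the unit: `mov [r13], rbx` at 0x10f49f, the store of pass 0. -/
abbrev cutE7c : Word := Vorbis.L.decode_residue.entry + 0x89f

/-- The entry assertion `At17Mid2` rebased on the present state: COMMON and the loop part `DecodeA` hold in the present memory,
the class book is the one read at the function's entry (`cbk7c`). -/
structure AtC7c (u₀ : State) (g : G) (cs pcount : Nat) (s : State) : Prop where
  /-- at the check call of `c->sparse` -/
  rip : s.rip = L.decode_residue.chk48
  /-- COMMON in the present state -/
  common : Common u₀ g s
  /-- `ch > 2` -/
  ch3 : 3 ≤ g.ch
  /-- `r12 = r` -/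
  r12 : s.reg .r12 = UInt64.ofNat g.r
  /-- the loop part of `At17`, in the present memory -/
  loop : DecodeA g cs pcount s
  /-- `r14 = c`, the class book -/
  r14 : s.reg .r14 = UInt64.ofNat (cbk7c g)
  /-- `rdi = &c->sparse` -/
  rdi : s.reg .rdi = UInt64.ofNat (cbk7c g) + 27
  /-- `[rbp−0xb8]` holds the DECODE_RAW result -/
  var : ∃ q : Int, DecodeRawResult s.mem (cbk7c g) q ∧ s.mem.readLE (g.e.reg .rsp - 192) 4 = (q % 2 ^ 32).toNat

/-- The assertion at `joinD7c` (0x10f447): as `AtC7c`, and the scratch slot holds `q`, a DECODE result (−1 or an entry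
number). -/
structure AtD7c (u₀ : State) (g : G) (cs pcount : Nat) (s : State) : Prop where
  /-- at `mov ebx, [rbp−0xb8]` -/
  rip : s.rip = joinD7c
  /-- COMMON in the present state -/
  common : Common u₀ g s
  /-- `ch > 2` -/
  ch3 : 3 ≤ g.ch
  /-- `r12 = r` -/
  r12 : s.reg .r12 = UInt64.ofNat g.r
  /-- the loop part of `At17`, in the present memory -/
  loop : DecodeA g cs pcount s
  /-- `[rbp−0xb8]` holds `q` -/
  var : ∃ q : Int, DecodeResult s.mem (cbk7c g) q ∧ s.mem.readLE (g.e.reg .rsp - 192) 4 = (q % 2 ^ 32).toNat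

/-- **The rebasing**: `At17` at the parent segment's entry `v` and `At17Mid2` at the present state `s` give `AtC7c` at `s`
(`At17Mid2.common`, `carry_decodeA7c`; the class book reads the same in `v.mem` and at the function's entry). No code is
walked. -/
theorem start7c {u₀ : State} {g : G} {cs pcount : Nat} {v s : State} (hent : Entered u₀ g)
    (hat : At17 u₀ g cs pcount v) (hm : At17Mid2 u₀ g v s) : AtC7c u₀ g cs pcount s := by
  obtain ⟨_, hc, hch3, _, hloop⟩ := hat
  have hcs : Common u₀ g s := hm.common hent hc
  have ecb : Residue.cbk v.mem g.f g.r = cbk7c g := hc.reads.cbk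
  have hsame : Mem.SameExcept (wins7c g) v.mem s.mem := hm.same
  refine ⟨hm.rip, hcs, hch3, hm.r12, ?_, ?_, ?_, ?_⟩
  · exact carry_decodeA7c hent hc hcs hch3 hsame hloop (hm.r15.trans hloop.r15)
  · rw [hm.r14, ecb]
  · rw [hm.rdi, ecb]
  · obtain ⟨q, hq, hslot⟩ := hm.var
    rw [ecb] at hq
    exact ⟨q, hq, hslot⟩

end Vorbis.Spec.decode_residue_7c
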